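-- pv_equiv track=rewrite | github.com/dahvid/graphutil | graphutil/graphutil.py | robust_topological_sort
-- ===== SOURCE A (Python) =====
-- def strongly_connected_components(graph):
--     """
--     Tarjan's Algorithm (named for its discoverer, Robert Tarjan) is a graph theory algorithm
--     for finding the strongly connected components of a graph.
--
--     Based on: http://en.wikipedia.org/wiki/Tarjan%27s_strongly_connected_components_algorithm
--     """
--
--     index_counter = [0]
--     stack = []
--     lowlinks = {}
--     index = {}
--     result = []
--
--     def strongconnect(node):
--         # set the depth index for this node to the smallest unused index
--         index[node] = index_counter[0]
--         lowlinks[node] = index_counter[0]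
--         index_counter[0] += 1
--         stack.append(node)
--
--         # Consider successors of `node`
--         try:
--             successors = graph[node]
--         except:
--             successors = []
--         for successor in successors:
--             if successor not in lowlinks:
--                 # Successor has not yet been visited; recurse on it
--                 strongconnect(successor)
--                 lowlinks[node] = min(lowlinks[node], lowlinks[successor])
--             elif successor in stack:
--                 # the successor is in the stack and hence in the current strongly connected component (SCC)
--                 lowlinks[node] = min(lowlinks[node], index[successor])
--
--         # If `node` is a root node, pop the stack and generate an SCC
--         if lowlinks[node] == index[node]:
--             connected_component = []
--
--             while True:
--                 successor = stack.pop()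
--                 connected_component.append(successor)
--                 if successor == node: break
--             component = tuple(connected_component)
--             # storing the result
--             result.append(component)
--
--     for node in graph:
--         if node not in lowlinks:
--             strongconnect(node)
--
--     return result
--
-- def topological_sort(graph):
--     count = {}
--     for node in graph:
--         count[node] = 0
--     for node in graph:
--         for successor in graph[node]:
--             count[successor] += 1
--
--     ready = [node for node in graph if count[node] == 0]
--
--     result = []
--     while ready:
--         node = ready.pop(-1)
--         result.append(node)
--
--         for successor in graph[node]:
--             count[successor] -= 1
--             if count[successor] == 0:
--                 ready.append(successor)
--
--     return result
--
-- def robust_topological_sort(graph):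
--     """ First identify strongly connected components,
--         then perform a topological sort on these components. """
--
--     components = strongly_connected_components(graph)
--
--     node_component = {}
--     for component in components:
--         for node in component:
--             node_component[node] = component
--
--     component_graph = {}
--     for component in components:
--         component_graph[component] = []
--
--     for node in graph:
--         node_c = node_component[node]
--         for successor in graph[node]:
--             successor_c = node_component[successor]
--             if node_c != successor_c:
--                 component_graph[node_c].append(successor_c)
--
--     return topological_sort(component_graph)
-- ===== SOURCE B (Python) =====
-- def robust_topological_sort(graph):
--     """Iterative Tarjan's SCC (explicit work stack instead of recursion), then a
--     materialised component edge list, then Kahn's algorithm on the condensation."""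
--
--     # --- strongly connected components: Tarjan with an explicit work stack ---
--     counter = [0]
--     stack = []
--     low = {}
--     idx = {}
--     comps = []
--
--     def succs(n):
--         return list(graph[n]) if n in graph else []
--
--     def visit(n):
--         idx[n] = low[n] = counter[0]
--         counter[0] += 1
--         stack.append(n)
--
--     def finish(n):
--         if low[n] == idx[n]:
--             comp = []
--             while True:
--                 w = stack.pop()
--                 comp.append(w)
--                 if w == n:
--                     break
--             comps.append(tuple(comp))
--
--     for root in graph:
--         if root in low:
--             continue
--         visit(root)
--         work = [(root, succs(root))]
--         while work:
--             node, todo = work.pop()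
--             if todo:
--                 child, rest = todo[0], todo[1:]
--                 if child not in low:
--                     # descend; the pending lowlink update happens when child's frame pops
--                     work.append((node, rest))
--                     visit(child)
--                     work.append((child, succs(child)))
--                 else:
--                     if child in stack:
--                         low[node] = min(low[node], idx[child])
--                     work.append((node, rest))
--             else:
--                 finish(node)
--                 if work:
--                     parent = work[-1][0]
--                     low[parent] = min(low[parent], low[node])
--
--     # --- condensation: one materialised edge list instead of nested dict updates ---
--     comp_of = {}
--     for comp in comps:
--         for n in comp:
--             comp_of[n] = comp
--
--     edges = [(comp_of[n], comp_of[s]) for n in graph for s in succs(n)]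
--
--     cg = {c: [] for c in comps}
--     for a, b in edges:
--         if a != b:
--             cg[a].append(b)
--
--     # --- Kahn's algorithm on the condensation (stack order, as in the original) ---
--     indeg = {c: 0 for c in cg}
--     for c in cg:
--         for d in cg[c]:
--             indeg[d] += 1
--
--     ready = [c for c in cg if indeg[c] == 0]
--     order = []
--     while ready:
--         c = ready.pop()
--         order.append(c)
--         newly = []
--         for d in cg[c]:
--             indeg[d] -= 1
--             if indeg[d] == 0:
--                 newly.append(d)
--         ready.extend(newly)
--     return order
-- ===== Notes on version B (the rewrite author's own statement) =====
-- stated objective: alternative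
-- what changed: B runs Tarjan's SCC with an explicit work stack of (node, remaining-successors) frames instead of recursion, builds the condensation from a single materialised component edge list instead of nested in-place dict-update loops, and drives Kahn's pass with explicit recursions collecting the newly-ready nodes per step.
import Mathlib
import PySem

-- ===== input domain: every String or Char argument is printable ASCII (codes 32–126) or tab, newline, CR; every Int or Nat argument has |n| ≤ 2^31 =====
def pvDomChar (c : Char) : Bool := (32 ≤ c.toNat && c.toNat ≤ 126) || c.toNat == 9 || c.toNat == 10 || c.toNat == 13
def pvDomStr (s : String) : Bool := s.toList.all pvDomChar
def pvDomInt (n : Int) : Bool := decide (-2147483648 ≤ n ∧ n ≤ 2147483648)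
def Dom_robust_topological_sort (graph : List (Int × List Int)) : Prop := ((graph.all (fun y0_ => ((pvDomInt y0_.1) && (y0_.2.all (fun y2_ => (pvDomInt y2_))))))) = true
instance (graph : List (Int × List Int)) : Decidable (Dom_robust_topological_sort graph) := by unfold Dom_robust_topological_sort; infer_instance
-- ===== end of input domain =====

-- B replaces the recursive Tarjan SCC pass by an explicit work-stack traversal, builds the
-- condensation from a materialised component edge list, and runs Kahn's pass over it with
-- explicit recursions; A keeps the original recursive/nested-fold pipeline.

-- Tarjan state shared as a TYPE by both ports (the Python node stack is kept with its TOP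
-- at the list HEAD: append = cons, pop = head; membership tests are order-independent).
structure pvSt where
  counter : Int
  stack   : List Int
  low     : PySem.Dict Int Int
  idx     : PySem.Dict Int Int
  res     : List (List Int)
deriving Repr, DecidableEq

-- ===== PORT A =====
def pvInit : pvSt := ⟨0, [], PySem.Dict.empty, PySem.Dict.empty, []⟩

-- `try: graph[node] except: []` (the only possible exception is KeyError)
def pvSuccs (g : List (Int × List Int)) (n : Int) : List Int :=
  ((PySem.Dict.mk g).get? n).getD []

def pvVisit (n : Int) (s : pvSt) : pvSt :=
  ⟨s.counter + 1, n :: s.stack, s.low.insert n s.counter, s.idx.insert n s.counter, s.res⟩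

def pvLowD (n : Int) (s : pvSt) : Int := s.low.getD n 0
def pvIdxD (n : Int) (s : pvSt) : Int := s.idx.getD n 0
def pvSetLow (n v : Int) (s : pvSt) : pvSt := { s with low := s.low.insert n v }

-- the `while True: stack.pop()` component pop
def pvPop (n : Int) : List Int → List Int → (List Int × List Int)
  | [], comp => (comp, [])
  | x :: st, comp => if x = n then (comp ++ [x], st) else pvPop n st (comp ++ [x])

-- the epilogue of `strongconnect`
def pvFinish (n : Int) (s : pvSt) : pvSt :=
  if pvLowD n s = pvIdxD n s then
    let p := pvPop n s.stack []
    ⟨s.counter, p.2, s.low, s.idx, s.res ++ [p.1]⟩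
  else s

-- recursion-depth fuel (totality guard only): more than the number of visitable nodes
def pvFuel (g : List (Int × List Int)) : Nat :=
  (g.map Prod.fst ++ (g.map Prod.snd).flatten).length

mutual
-- strongconnect(node); fuel bounds the recursion depth
def pvSC (g : List (Int × List Int)) (f : Nat) (n : Int) (s : pvSt) : pvSt :=
  let s1 := pvVisit n s
  let s2 := match f with
    | 0 => s1
    | f' + 1 => pvSCLoop g f' n (pvSuccs g n) s1
  pvFinish n s2
termination_by (f, 0)

-- the `for successor in successors` loop
def pvSCLoop (g : List (Int × List Int)) (f : Nat) (n : Int) : List Int → pvSt → pvSt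
  | [], s => s
  | c :: cs, s =>
    if (s.low.get? c).isNone then
      let s' := pvSC g f c s
      pvSCLoop g f n cs (pvSetLow n (min (pvLowD n s') (pvLowD c s')) s')
    else if c ∈ s.stack then
      pvSCLoop g f n cs (pvSetLow n (min (pvLowD n s) (pvIdxD c s)) s)
    else pvSCLoop g f n cs s
termination_by cs _ => (f, cs.length + 1)
end

def pvSCCrec (g : List (Int × List Int)) : List (List Int) :=
  ((g.map Prod.fst).foldl
    (fun s n => if (s.low.get? n).isNone then pvSC g (pvFuel g + 1) n s else s) pvInit).res

-- the condensation: nested folds of in-place dict updates, as in the Python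
def pvCondense (g : List (Int × List Int)) (comps : List (List Int)) :
    PySem.Dict (List Int) (List (List Int)) :=
  let nodeComp : PySem.Dict Int (List Int) :=
    comps.foldl (fun d comp => comp.foldl (fun d n => d.insert n comp) d) PySem.Dict.empty
  let cg0 : PySem.Dict (List Int) (List (List Int)) :=
    comps.foldl (fun d comp => d.insert comp []) PySem.Dict.empty
  (g.map Prod.fst).foldl (fun d n =>
    let nc := nodeComp.getD n []
    (pvSuccs g n).foldl (fun d c =>
      let sc := nodeComp.getD c []
      if nc ≠ sc then d.modify nc [] (fun l => l ++ [sc]) else d) d) cg0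

-- `ready` is kept with its TOP (Python list end) at the HEAD; fuel is a totality guard
def pvKahn (cg : PySem.Dict (List Int) (List (List Int))) :
    Nat → List (List Int) → PySem.Dict (List Int) Int → List (List Int) → List (List Int)
  | 0, _, _, res => res
  | _ + 1, [], _, res => res
  | f + 1, n :: rdy, cnt, res =>
      let step := (cg.getD n []).foldl
        (fun (p : PySem.Dict (List Int) Int × List (List Int)) c =>
          let cnt' := p.1.modify c 0 (fun x => x - 1)
          if cnt'.getD c 0 == 0 then (cnt', c :: p.2) else (cnt', p.2)) (cnt, rdy)
      pvKahn cg f step.2 step.1 (res ++ [n])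

def pvTopo (cg : PySem.Dict (List Int) (List (List Int))) : List (List Int) :=
  let ks := cg.keys
  let cnt0 := ks.foldl (fun d k => d.insert k (0 : Int)) PySem.Dict.empty
  let cnt := ks.foldl (fun d k =>
    (cg.getD k []).foldl (fun d c => d.modify c 0 (fun x => x + 1)) d) cnt0
  let ready := (ks.filter (fun k => cnt.getD k 0 == 0)).reverse
  pvKahn cg (ks.length + 1) ready cnt []

def robust_topological_sort (graph : List (Int × List Int)) : List (List Int) :=
  pvTopo (pvCondense graph (pvSCCrec graph))

-- ===== PORT B =====
def bcSuccs (g : List (Int × List Int)) (n : Int) : List Int :=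
  match (PySem.Dict.mk g).get? n with
  | some l => l
  | none => []

def bcVisit (n : Int) (s : pvSt) : pvSt :=
  { s with counter := s.counter + 1, stack := n :: s.stack,
           low := s.low.insert n s.counter, idx := s.idx.insert n s.counter }

def bcLow (n : Int) (s : pvSt) : Int := s.low.getD n 0
def bcIdx (n : Int) (s : pvSt) : Int := s.idx.getD n 0
def bcSetLow (n v : Int) (s : pvSt) : pvSt := { s with low := s.low.insert n v }

-- the component pop, accumulating by cons and reversing at the end
def bcPop (n : Int) : List Int → List Int → (List Int × List Int)
  | [], acc => (acc.reverse, [])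
  | x :: st, acc => if x = n then ((x :: acc).reverse, st) else bcPop n st (x :: acc)

def bcFinish (n : Int) (s : pvSt) : pvSt :=
  if bcLow n s = bcIdx n s then
    let p := bcPop n s.stack []
    { s with stack := p.2, res := s.res ++ [p.1] }
  else s

-- depth fuel for the machine (totality guard only)
def bcFuel (g : List (Int × List Int)) : Nat :=
  (g.map Prod.fst ++ (g.map Prod.snd).flatten).length

-- longest successor list (for the machine's termination measure only)
def bcMaxSucc (g : List (Int × List Int)) : Nat :=
  (g.map (fun p => p.2.length)).foldr max 0

def bcWeight (L : Nat) : Nat × Int × List Int → Nat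
  | (f, _, cs) => (L + 1) ^ f * (2 * cs.length + 1)

theorem bcSuccs_len_le (g : List (Int × List Int)) (n : Int) :
    (bcSuccs g n).length ≤ bcMaxSucc g := by
  induction g with
  | nil => simp [bcSuccs, bcMaxSucc, PySem.Dict.get?]
  | cons p g ih =>
    simp only [bcSuccs, bcMaxSucc, List.map_cons, List.foldr_cons] at *
    rw [PySem.Dict.get?_mk_cons]
    by_cases h : (p.1 == n) = true
    · simp [h]
    · simp only [h]
      exact ih.trans (le_max_right _ _)

-- the `while work:` machine; frames are (remaining depth fuel, node, remaining successors)
def bcRun (g : List (Int × List Int)) : List (Nat × Int × List Int) → pvSt → pvSt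
  | [], s => s
  | (_, n, []) :: F, s =>
      let s1 := bcFinish n s
      match F with
      | [] => s1
      | (fp, p, ps) :: F' =>
          bcRun g ((fp, p, ps) :: F') (bcSetLow p (min (bcLow p s1) (bcLow n s1)) s1)
  | (f, n, c :: cs) :: F, s =>
      if (s.low.get? c).isNone then
        match f with
        | 0 => bcRun g ((0, c, []) :: (0, n, cs) :: F) (bcVisit c s)
        | f' + 1 => bcRun g ((f', c, bcSuccs g c) :: (f' + 1, n, cs) :: F) (bcVisit c s)
      else if c ∈ s.stack then bcRun g ((f, n, cs) :: F) (bcSetLow n (min (bcLow n s) (bcIdx c s)) s)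
      else bcRun g ((f, n, cs) :: F) s
termination_by F _ => (F.map (bcWeight (bcMaxSucc g))).sum
decreasing_by
  · simp [bcWeight]
  · simp [bcWeight]; omega
  · simp [bcWeight]
    have h1 : (bcSuccs g c).length ≤ bcMaxSucc g := bcSuccs_len_le g c
    have h2 : (bcMaxSucc g + 1) ^ f' * (2 * (bcSuccs g c).length + 1) <
        (bcMaxSucc g + 1) ^ (f' + 1) * 2 := by
      rw [pow_succ]
      calc (bcMaxSucc g + 1) ^ f' * (2 * (bcSuccs g c).length + 1)
          < (bcMaxSucc g + 1) ^ f' * (2 * (bcMaxSucc g + 1)) :=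
            Nat.mul_lt_mul_of_le_of_lt (le_refl _) (by omega) (pow_pos (by omega) f')
        _ = (bcMaxSucc g + 1) ^ f' * (bcMaxSucc g + 1) * 2 := by ring
    have h3 : (bcMaxSucc g + 1) ^ (f' + 1) * (2 * (cs.length + 1) + 1) =
        (bcMaxSucc g + 1) ^ (f' + 1) * (2 * cs.length + 1) + (bcMaxSucc g + 1) ^ (f' + 1) * 2 := by
      ring
    omega
  · simp [bcWeight]
  · simp [bcWeight]

-- the `for root in graph` loop, as structural recursion over the root list
def bcMain (g : List (Int × List Int)) : List Int → pvSt → pvSt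
  | [], s => s
  | r :: rs, s =>
      if (s.low.get? r).isNone then
        bcMain g rs (bcRun g [(bcFuel g, r, bcSuccs g r)] (bcVisit r s))
      else bcMain g rs s

def bcSCC (g : List (Int × List Int)) : List (List Int) :=
  (bcMain g (g.map Prod.fst) ⟨0, [], PySem.Dict.empty, PySem.Dict.empty, []⟩).res

-- comp_of: explicit recursions over components and their nodes
def bcAssign (c : List Int) : List Int → PySem.Dict Int (List Int) → PySem.Dict Int (List Int)
  | [], d => d
  | n :: ns, d => bcAssign c ns (d.insert n c)

def bcCompOf : List (List Int) → PySem.Dict Int (List Int) → PySem.Dict Int (List Int)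
  | [], d => d
  | c :: cs, d => bcCompOf cs (bcAssign c c d)

-- the materialised component edge list
def bcEdges (g : List (Int × List Int)) (co : PySem.Dict Int (List Int)) :
    List (List Int × List Int) :=
  (g.map Prod.fst).flatMap (fun n => (bcSuccs g n).map (fun s => (co.getD n [], co.getD s [])))

def bcCG0 : List (List Int) →
    PySem.Dict (List Int) (List (List Int)) → PySem.Dict (List Int) (List (List Int))
  | [], d => d
  | c :: cs, d => bcCG0 cs (d.insert c [])

def bcAddEdges : List (List Int × List Int) →
    PySem.Dict (List Int) (List (List Int)) → PySem.Dict (List Int) (List (List Int))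
  | [], d => d
  | e :: es, d => bcAddEdges es (if e.1 ≠ e.2 then d.modify e.1 [] (fun l => l ++ [e.2]) else d)

def bcCondense (g : List (Int × List Int)) (comps : List (List Int)) :
    PySem.Dict (List Int) (List (List Int)) :=
  let co := bcCompOf comps PySem.Dict.empty
  bcAddEdges (bcEdges g co) (bcCG0 comps PySem.Dict.empty)

-- indegree table: explicit recursions
def bcZero : List (List Int) → PySem.Dict (List Int) Int → PySem.Dict (List Int) Int
  | [], d => d
  | k :: ks, d => bcZero ks (d.insert k 0)

def bcBump : List (List Int) → PySem.Dict (List Int) Int → PySem.Dict (List Int) Int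
  | [], d => d
  | c :: cs, d => bcBump cs (d.modify c 0 (fun x => x + 1))

def bcIncrAll (cg : PySem.Dict (List Int) (List (List Int))) :
    List (List Int) → PySem.Dict (List Int) Int → PySem.Dict (List Int) Int
  | [], d => d
  | k :: ks, d => bcIncrAll cg ks (bcBump (cg.getD k []) d)

-- one Kahn step over the popped node's successors: new counts plus the newly-ready list
def bcDec : List (List Int) → PySem.Dict (List Int) Int →
    (PySem.Dict (List Int) Int × List (List Int))
  | [], cnt => (cnt, [])
  | c :: cs, cnt =>
      let cnt' := cnt.modify c 0 (fun x => x - 1)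
      let r := bcDec cs cnt'
      if cnt'.getD c 0 == 0 then (r.1, c :: r.2) else r

-- Kahn's loop; `ready` kept in Python order (pop = last element, via reverse)
def bcKahn (cg : PySem.Dict (List Int) (List (List Int))) :
    Nat → List (List Int) → PySem.Dict (List Int) Int → List (List Int) → List (List Int)
  | 0, _, _, out => out
  | f + 1, ready, cnt, out =>
      match ready.reverse with
      | [] => out
      | c :: rest =>
          let r := bcDec (cg.getD c []) cnt
          bcKahn cg f (rest.reverse ++ r.2) r.1 (out ++ [c])

def bcTopo (cg : PySem.Dict (List Int) (List (List Int))) : List (List Int) :=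
  let ks := cg.keys
  let cnt := bcIncrAll cg ks (bcZero ks PySem.Dict.empty)
  bcKahn cg (ks.length + 1) (ks.filter (fun k => cnt.getD k 0 == 0)) cnt []

def robust_topological_sort_alt (graph : List (Int × List Int)) : List (List Int) :=
  bcTopo (bcCondense graph (bcSCC graph))

-- ===== PRECONDITION & SPEC =====
def Spec_robust_topological_sort (graph : List (Int × List Int)) (out : List (List Int)) : Prop := out = robust_topological_sort_alt graph
instance (graph : List (Int × List Int)) (out : List (List Int)) : Decidable (Spec_robust_topological_sort graph out) := by unfold Spec_robust_topological_sort; infer_instance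

-- ===== CLAIM (what is proved, stated in full; the proofs are below) =====
def Claim_equal_robust_topological_sort : Prop := ∀ (graph : List (Int × List Int)), Dom_robust_topological_sort graph → Spec_robust_topological_sort graph (robust_topological_sort graph)

-- ===== LEMMAS AND PROOFS =====
-- B's primitive helpers agree with A's
theorem bcSuccs_eq : bcSuccs = pvSuccs := by
  funext g n
  unfold bcSuccs pvSuccs
  cases (PySem.Dict.mk g).get? n <;> rfl
theorem bcVisit_eq : bcVisit = pvVisit := rfl
theorem bcLow_eq : bcLow = pvLowD := rfl
theorem bcIdx_eq : bcIdx = pvIdxD := rfl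
theorem bcSetLow_eq : bcSetLow = pvSetLow := rfl

theorem bcPop_eq (n : Int) : ∀ (st acc : List Int), bcPop n st acc = pvPop n st acc.reverse := by
  intro st
  induction st with
  | nil => intro acc; simp [bcPop, pvPop]
  | cons x st ih =>
    intro acc
    simp only [bcPop, pvPop]
    split
    · simp
    · rw [ih]; simp

theorem bcFinish_eq : bcFinish = pvFinish := by
  funext n s
  simp only [bcFinish, pvFinish, bcLow_eq, bcIdx_eq, bcPop_eq]
  rfl

theorem bcFuel_eq : bcFuel = pvFuel := rfl

-- what happens to the state when a frame for `n` is fully popped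
def pvAfter (F : List (Nat × Int × List Int)) (n : Int) (s : pvSt) : pvSt :=
  match F with
  | [] => s
  | (_, p, _) :: _ => pvSetLow p (min (pvLowD p s) (pvLowD n s)) s

theorem bcRun_nilSuccs (g : List (Int × List Int)) (f : Nat) (n : Int)
    (F : List (Nat × Int × List Int)) (s : pvSt) :
    bcRun g ((f, n, []) :: F) s = bcRun g F (pvAfter F n (pvFinish n s)) := by
  cases F with
  | nil => simp [bcRun, pvAfter, bcFinish_eq]
  | cons fr F' =>
    obtain ⟨fp, p, ps⟩ := fr
    simp [bcRun, pvAfter, bcFinish_eq, bcSetLow_eq, bcLow_eq]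

-- the simulation: one frame behaves like the tail of `strongconnect` plus its return update
theorem bcRun_simulates (f : Nat) : ∀ (cs : List Int) (g : List (Int × List Int)) (n : Int)
    (F : List (Nat × Int × List Int)) (s : pvSt),
    bcRun g ((f, n, cs) :: F) s = bcRun g F (pvAfter F n (pvFinish n (pvSCLoop g f n cs s))) := by
  induction f using Nat.strong_induction_on with
  | _ f IHf =>
    intro cs
    induction cs with
    | nil =>
      intro g n F s
      rw [bcRun_nilSuccs]
      simp [pvSCLoop]
    | cons c cs IHcs =>
      intro g n F s
      by_cases h : (s.low.get? c).isNone
      · cases f with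
        | zero =>
          simp only [bcRun, h, if_pos, bcVisit_eq, bcFinish_eq, bcSetLow_eq, bcLow_eq]
          rw [IHcs]
          simp only [pvSCLoop, pvSC, h, if_pos, pvAfter]
        | succ f' =>
          simp only [bcRun, h, if_pos, bcVisit_eq, bcSetLow_eq, bcLow_eq, bcIdx_eq,
            bcSuccs_eq]
          rw [IHf f' (by omega), IHcs]
          simp only [pvSCLoop, pvSC, h, if_pos, pvAfter]
      · by_cases h2 : c ∈ s.stack
        · rw [show bcRun g ((f, n, c :: cs) :: F) s
              = bcRun g ((f, n, cs) :: F) (pvSetLow n (min (pvLowD n s) (pvIdxD c s)) s) by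
            conv_lhs => rw [bcRun.eq_def]
            simp [h, h2, bcSetLow_eq, bcLow_eq, bcIdx_eq]]
          rw [IHcs]
          simp only [pvSCLoop]
          rw [if_neg h, if_pos h2]
        · rw [show bcRun g ((f, n, c :: cs) :: F) s = bcRun g ((f, n, cs) :: F) s by
            conv_lhs => rw [bcRun.eq_def]
            simp [h, h2]]
          rw [IHcs]
          simp only [pvSCLoop]
          rw [if_neg h, if_neg h2]

theorem bcRoot_eq (g : List (Int × List Int)) (n : Int) (s : pvSt) :
    (if (s.low.get? n).isNone then bcRun g [(bcFuel g, n, bcSuccs g n)] (bcVisit n s) else s)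
      = (if (s.low.get? n).isNone then pvSC g (pvFuel g + 1) n s else s) := by
  split
  · rw [bcRun_simulates]
    simp [bcRun, pvAfter, pvSC, bcVisit_eq, bcSuccs_eq, bcFuel_eq]
  · rfl

theorem bcMain_eq_foldl (g : List (Int × List Int)) :
    ∀ (l : List Int) (s : pvSt), bcMain g l s
      = l.foldl (fun s n => if (s.low.get? n).isNone then pvSC g (pvFuel g + 1) n s else s) s := by
  intro l
  induction l with
  | nil => intro s; simp [bcMain]
  | cons r rs ih =>
    intro s
    by_cases h : (s.low.get? r).isNone
    · have hm : bcMain g (r :: rs) s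
          = bcMain g rs (bcRun g [(bcFuel g, r, bcSuccs g r)] (bcVisit r s)) := by
        simp [bcMain, h]
      rw [hm, ih, List.foldl_cons, ← bcRoot_eq g r s, if_pos h]
    · have hm : bcMain g (r :: rs) s = bcMain g rs s := by simp [bcMain, h]
      rw [hm, ih, List.foldl_cons, ← bcRoot_eq g r s, if_neg h]

theorem bcSCC_eq (g : List (Int × List Int)) : bcSCC g = pvSCCrec g := by
  unfold bcSCC pvSCCrec pvInit
  rw [bcMain_eq_foldl]

-- condensation: B's staged edge list equals A's nested folds
theorem bcAssign_eq_foldl (c : List Int) : ∀ (ns : List Int) (d : PySem.Dict Int (List Int)),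
    bcAssign c ns d = ns.foldl (fun d n => d.insert n c) d := by
  intro ns
  induction ns with
  | nil => intro d; simp [bcAssign]
  | cons n ns ih => intro d; simp [bcAssign, ih]

theorem bcCompOf_eq_foldl : ∀ (cs : List (List Int)) (d : PySem.Dict Int (List Int)),
    bcCompOf cs d = cs.foldl (fun d comp => comp.foldl (fun d n => d.insert n comp) d) d := by
  intro cs
  induction cs with
  | nil => intro d; simp [bcCompOf]
  | cons c cs ih => intro d; simp [bcCompOf, ih, bcAssign_eq_foldl]

theorem bcCG0_eq_foldl : ∀ (cs : List (List Int)) (d : PySem.Dict (List Int) (List (List Int))),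
    bcCG0 cs d = cs.foldl (fun d c => d.insert c []) d := by
  intro cs
  induction cs with
  | nil => intro d; simp [bcCG0]
  | cons c cs ih => intro d; simp [bcCG0, ih]

theorem bcAddEdges_eq_foldl : ∀ (es : List (List Int × List Int))
    (d : PySem.Dict (List Int) (List (List Int))),
    bcAddEdges es d
      = es.foldl (fun d e => if e.1 ≠ e.2 then d.modify e.1 [] (fun l => l ++ [e.2]) else d) d := by
  intro es
  induction es with
  | nil => intro d; simp [bcAddEdges]
  | cons e es ih => intro d; simp [bcAddEdges, ih]

theorem foldl_flatMap {α β γ : Type} (l : List α) (f : α → List β) (g : γ → β → γ) (i : γ) :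
    (l.flatMap f).foldl g i = l.foldl (fun a x => (f x).foldl g a) i := by
  induction l generalizing i with
  | nil => simp
  | cons x l ih => simp [List.foldl_append, ih]

theorem bcCondense_eq (g : List (Int × List Int)) (comps : List (List Int)) :
    bcCondense g comps = pvCondense g comps := by
  simp only [bcCondense, pvCondense, bcEdges, bcCompOf_eq_foldl, bcCG0_eq_foldl,
    bcAddEdges_eq_foldl, foldl_flatMap, List.foldl_map, bcSuccs_eq]

-- Kahn: B's explicit recursions equal A's folds
theorem bcZero_eq_foldl : ∀ (ks : List (List Int)) (d : PySem.Dict (List Int) Int),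
    bcZero ks d = ks.foldl (fun d k => d.insert k (0 : Int)) d := by
  intro ks
  induction ks with
  | nil => intro d; simp [bcZero]
  | cons k ks ih => intro d; simp [bcZero, ih]

theorem bcBump_eq_foldl : ∀ (cs : List (List Int)) (d : PySem.Dict (List Int) Int),
    bcBump cs d = cs.foldl (fun d c => d.modify c 0 (fun x => x + 1)) d := by
  intro cs
  induction cs with
  | nil => intro d; simp [bcBump]
  | cons c cs ih => intro d; simp [bcBump, ih]

theorem bcIncrAll_eq_foldl (cg : PySem.Dict (List Int) (List (List Int))) :
    ∀ (ks : List (List Int)) (d : PySem.Dict (List Int) Int),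
    bcIncrAll cg ks d
      = ks.foldl (fun d k => (cg.getD k []).foldl (fun d c => d.modify c 0 (fun x => x + 1)) d) d := by
  intro ks
  induction ks with
  | nil => intro d; simp [bcIncrAll]
  | cons k ks ih => intro d; simp [bcIncrAll, ih, bcBump_eq_foldl]

theorem bcDec_spec : ∀ (cs : List (List Int)) (cnt : PySem.Dict (List Int) Int)
    (acc : List (List Int)),
    cs.foldl (fun (p : PySem.Dict (List Int) Int × List (List Int)) c =>
        let cnt' := p.1.modify c 0 (fun x => x - 1)
        if cnt'.getD c 0 == 0 then (cnt', c :: p.2) else (cnt', p.2)) (cnt, acc)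
      = ((bcDec cs cnt).1, (bcDec cs cnt).2.reverse ++ acc) := by
  intro cs
  induction cs with
  | nil => intro cnt acc; simp [bcDec]
  | cons c cs ih =>
    intro cnt acc
    by_cases h : (((cnt.modify c 0 (fun x => x - 1)).getD c 0) == 0) = true
    · simp only [List.foldl_cons, bcDec, h, if_true]
      rw [ih]
      simp
    · simp only [List.foldl_cons, bcDec, h]
      rw [ih]
      simp

theorem bcKahn_eq (cg : PySem.Dict (List Int) (List (List Int))) :
    ∀ (f : Nat) (rdy : List (List Int)) (cnt : PySem.Dict (List Int) Int)
      (res : List (List Int)),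
    pvKahn cg f rdy cnt res = bcKahn cg f rdy.reverse cnt res := by
  intro f
  induction f with
  | zero => intro rdy cnt res; simp [pvKahn, bcKahn]
  | succ f ih =>
    intro rdy cnt res
    cases rdy with
    | nil => simp [pvKahn, bcKahn]
    | cons n rdy =>
      simp only [pvKahn, bcKahn, List.reverse_reverse, bcDec_spec]
      rw [ih]
      simp

theorem bcTopo_eq (cg : PySem.Dict (List Int) (List (List Int))) : bcTopo cg = pvTopo cg := by
  simp only [bcTopo, pvTopo, bcZero_eq_foldl, bcIncrAll_eq_foldl, bcKahn_eq,
    List.reverse_reverse]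

-- ===== VERDICT (by name: the statement is the Claim_ definition above) =====
theorem robust_topological_sort_spec : Claim_equal_robust_topological_sort := by
  intro graph _
  unfold Spec_robust_topological_sort robust_topological_sort robust_topological_sort_alt
  rw [bcSCC_eq, bcCondense_eq, bcTopo_eq]
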